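-- pv_equiv track=rewrite | github.com/blotto/cistercian_counter | create_video_clamped.py | get_composite_digits
-- ===== SOURCE A (Python) =====
-- BASE = 9999                        # Maximum value per runic digit
--
-- def saturated_digits(x):
--     """
--     Convert a positive integer x into a list of runic digits using a saturated system.
--     If x <= 9999, return [x]. If x > 9999, the least-significant digit is clamped at 9999,
--     and the overflow is carried to the next digit on the left.
--
--     Examples:
--       saturated_digits(1)      -> [1]
--       saturated_digits(9999)   -> [9999]
--       saturated_digits(10000)  -> [1, 9999]
--       saturated_digits(10001)  -> [2, 9999]
--     """
--     if x <= BASE: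
--         return [x]
--     else:
--         return saturated_digits(x - BASE) + [BASE]
--
-- def get_composite_digits(num, fixed_digits):
--     """
--     Convert a frame number (starting at 1) into a fixed-length list of runic digits.
--     Uses the saturated_digits conversion and pads on the left with zeros (runic zero)
--     so that the total number of digits is fixed.
--     """
--     # For frame number 0, return [0]
--     if num == 0:
--         rep = [0]
--     else:
--         rep = saturated_digits(num)
--     # Pad with 0's on the left until the length equals fixed_digits.
--     while len(rep) < fixed_digits:
--         rep = [0] + rep
--     return rep
-- ===== SOURCE B (Python) =====
-- BASE = 9999
--
-- def get_composite_digits(num, fixed_digits):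
--     # Closed form: k carries = (num-1)//BASE for num > 0, digits = [num-k*BASE] + [BASE]*k.
--     if num <= 0:
--         rep = [num]
--     else:
--         k = (num - 1) // BASE
--         rep = [num - k * BASE] + [BASE] * k
--     pad = fixed_digits - len(rep)
--     return [0] * max(pad, 0) + rep
-- ===== Notes on version B (the rewrite author's own statement) =====
-- stated objective: faster
-- what changed: Replaces the recursive subtract-9999-and-concatenate conversion and the left-padding while-loop with a closed-form carry count k=(num-1)//9999 and direct list construction [num-k*9999]+[9999]*k with one replicated zero-pad prefix.
import Mathlib
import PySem

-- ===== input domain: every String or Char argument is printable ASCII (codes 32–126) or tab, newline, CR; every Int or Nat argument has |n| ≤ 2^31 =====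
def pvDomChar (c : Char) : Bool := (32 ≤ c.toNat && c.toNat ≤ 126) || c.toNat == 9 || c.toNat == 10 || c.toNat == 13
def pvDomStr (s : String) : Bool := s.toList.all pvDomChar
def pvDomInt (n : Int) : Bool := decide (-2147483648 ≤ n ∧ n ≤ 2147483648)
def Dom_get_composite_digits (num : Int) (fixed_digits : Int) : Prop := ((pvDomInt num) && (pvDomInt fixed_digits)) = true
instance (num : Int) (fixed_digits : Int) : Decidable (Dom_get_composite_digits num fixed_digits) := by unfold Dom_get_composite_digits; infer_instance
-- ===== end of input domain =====

-- B replaces A's recursive subtract-and-concatenate conversion and padding while-loop with a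
-- closed-form carry count and direct list construction; Pre_ excludes large num where A's
-- deep recursion hits Python's recursion limit and raises RecursionError.


-- ===== PORT A =====
def saturated_digits (x : Int) : List Int :=
  if x ≤ 9999 then [x]
  else saturated_digits (x - 9999) ++ [9999]
termination_by x.toNat
decreasing_by omega

-- the `while len(rep) < fixed_digits: rep = [0] + rep` loop
def padLoopA (rep : List Int) (fixed_digits : Int) : List Int :=
  if (rep.length : Int) < fixed_digits then padLoopA (0 :: rep) fixed_digits
  else rep
termination_by (fixed_digits - rep.length).toNat
decreasing_by simp; omega

def get_composite_digits (num : Int) (fixed_digits : Int) : List Int :=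
  let rep := if num = 0 then [0] else saturated_digits num
  padLoopA rep fixed_digits

-- ===== PORT B =====
def get_composite_digits_alt (num : Int) (fixed_digits : Int) : List Int :=
  let rep :=
    if num ≤ 0 then [num]
    else
      let k := PySem.Int.floordiv (num - 1) 9999
      (num - k * 9999) :: List.replicate k.toNat 9999
  let pad := fixed_digits - (rep.length : Int)
  List.replicate (max pad 0).toNat 0 ++ rep

-- ===== PRECONDITION & SPEC =====
-- Pre_ excludes num > 94990500 (more than 9499 carries), where A's recursion depth (one frame
-- per carry) approaches the recursion limit of 10000 under which A is run and A raises
-- RecursionError; at 10000 carries and above A raises unconditionally, while in the narrow band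
-- just below the limit whether A returns or raises depends on the caller's existing stack depth,
-- so that band stays outside Pre_ too.
def Pre_get_composite_digits (num : Int) (fixed_digits : Int) : Prop := num ≤ 94990500
instance (num : Int) (fixed_digits : Int) : Decidable (Pre_get_composite_digits num fixed_digits) := by unfold Pre_get_composite_digits; infer_instance
def pvWitness_get_composite_digits : Int × Int := (10001, 4)


def Spec_get_composite_digits (num : Int) (fixed_digits : Int) (out : List Int) : Prop := out = get_composite_digits_alt num fixed_digits
instance (num : Int) (fixed_digits : Int) (out : List Int) : Decidable (Spec_get_composite_digits num fixed_digits out) := by unfold Spec_get_composite_digits; infer_instance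

-- ===== CLAIM (what is proved, stated in full; the proofs are below) =====
def Claim_equal_get_composite_digits : Prop := ∀ (num : Int) (fixed_digits : Int), Dom_get_composite_digits num fixed_digits → Pre_get_composite_digits num fixed_digits → Spec_get_composite_digits num fixed_digits (get_composite_digits num fixed_digits)


-- ===== LEMMAS AND PROOFS =====

-- the padding loop is a replicated-zero prefix
lemma padLoopA_eq (rep : List Int) (fd : Int) :
    padLoopA rep fd = List.replicate (fd - rep.length).toNat 0 ++ rep := by
  generalize h : (fd - rep.length).toNat = n
  induction n generalizing rep with
  | zero => rw [padLoopA, if_neg (by omega)]; simp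
  | succ n ih =>
      rw [padLoopA]
      rw [if_pos (by omega)]
      rw [ih (0 :: rep) (by simp; omega)]
      simp [List.replicate_succ']

-- the recursive saturated conversion has the closed form of B
lemma saturated_digits_eq (x : Int) (hx : 1 ≤ x) :
    saturated_digits x =
      (x - PySem.Int.floordiv (x - 1) 9999 * 9999) ::
        List.replicate (PySem.Int.floordiv (x - 1) 9999).toNat 9999 := by
  rw [PySem.Int.floordiv_eq_ediv_of_pos (by omega)]
  generalize hn : x.toNat = n
  induction n using Nat.strong_induction_on generalizing x with
  | _ n ih =>
    rw [saturated_digits]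
    by_cases h : x ≤ 9999
    · rw [if_pos h]
      have : (x - 1) / 9999 = 0 := by omega
      simp [this]
    · rw [if_neg h]
      rw [ih (x - 9999).toNat (by omega) (x - 9999) (by omega) rfl]
      have h1 : (x - 1) / 9999 = (x - 9999 - 1) / 9999 + 1 := by omega
      have h2 : 0 ≤ (x - 9999 - 1) / 9999 := Int.ediv_nonneg (by omega) (by omega)
      rw [h1]
      have h3 : ((x - 9999 - 1) / 9999 + 1).toNat = ((x - 9999 - 1) / 9999).toNat + 1 := by omega
      rw [h3, List.replicate_succ']
      simp only [List.cons_append]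
      congr 1
      omega

-- ===== VERDICT (by name: the statement is the Claim_ definition above) =====
theorem get_composite_digits_spec : Claim_equal_get_composite_digits := by
  intro num fd _ _
  unfold Spec_get_composite_digits get_composite_digits get_composite_digits_alt
  have hmax : ∀ p : Int, (max p 0).toNat = p.toNat := by
    intro p
    rcases le_total p 0 with h | h
    · rw [max_eq_right h]; omega
    · rw [max_eq_left h]
  by_cases h0 : num ≤ 0
  · have hne : (if num = 0 then [(0 : Int)] else saturated_digits num) = [num] := by
      by_cases h : num = 0
      · simp [h]
      · rw [if_neg h, saturated_digits, if_pos (by omega)]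
    rw [hne, padLoopA_eq]
    simp [if_pos h0, hmax]
  · rw [if_neg (by omega), if_neg h0, saturated_digits_eq num (by omega), padLoopA_eq]
    simp [hmax]
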